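-- pv_equiv track=rewrite | github.com/HENNGE/terraform-check | tfcheck.py | remove_plan
-- ===== SOURCE A (Python) =====
-- def remove_plan(report: str) -> str:
--     report_lines = []
--     add_line = True
--     for line in report.splitlines():
--         if add_line and line == "<details><summary>Show Plan</summary>":
--             add_line = False
--         if add_line:
--             report_lines.append(line)
--         if not add_line and line == "</details>":
--             add_line = True
--     return "\n".join(report_lines)
-- ===== SOURCE B (Python) =====
-- def remove_plan(report: str) -> str:
--     START = "<details><summary>Show Plan</summary>"
--     END = "</details>"
--     kept = []
--     rest = report.splitlines()
--     while START in rest: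
--         s = rest.index(START)
--         kept += rest[:s]
--         tail = rest[s + 1:]
--         if END not in tail:
--             return "\n".join(kept)
--         rest = tail[tail.index(END) + 1:]
--     return "\n".join(kept + rest)
-- ===== Notes on version B (the rewrite author's own statement) =====
-- stated objective: alternative
-- what changed: Replaced A's per-line boolean-flag state machine with marker-position search: B repeatedly locates the start marker with list.index, copies the preceding slice wholesale, jumps to past the matching </details> via index on the tail slice, and joins the collected segments.
import Mathlib
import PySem

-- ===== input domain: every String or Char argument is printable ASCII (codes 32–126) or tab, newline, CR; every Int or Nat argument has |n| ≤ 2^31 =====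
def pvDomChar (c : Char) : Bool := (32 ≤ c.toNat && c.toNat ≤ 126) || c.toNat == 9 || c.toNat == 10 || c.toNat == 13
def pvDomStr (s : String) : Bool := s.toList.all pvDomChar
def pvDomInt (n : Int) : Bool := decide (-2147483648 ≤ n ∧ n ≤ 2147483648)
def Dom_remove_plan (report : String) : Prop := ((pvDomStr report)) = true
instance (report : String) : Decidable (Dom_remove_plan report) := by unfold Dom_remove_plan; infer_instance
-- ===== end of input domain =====

-- B replaces A's per-line boolean-flag state machine by marker-position search:
-- list.index locates each start marker, slices copy the kept segment wholesale,
-- and index on the tail jumps past the matching closer (objective: alternative, same cost).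

-- ===== PORT A =====
-- one iteration of A's for-loop body over state (report_lines, add_line)
def removePlanStepA (st : List String × Bool) (line : String) : List String × Bool :=
  let add1 := if st.2 ∧ line = "<details><summary>Show Plan</summary>" then false else st.2
  let acc1 := if add1 then st.1 ++ [line] else st.1
  let add2 := if ¬ add1 ∧ line = "</details>" then true else add1
  (acc1, add2)

def remove_plan (report : String) : String :=
  PySem.Str.join "\n" (((PySem.Str.splitlines report).foldl removePlanStepA ([], true)).1)

-- ===== PORT B =====
-- Source B's while loop: kept accumulates copied slices, rest is the unprocessed suffix
def removePlanGo (kept rest : List String) : List String :=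
  match h : PySem.List.index? rest "<details><summary>Show Plan</summary>" with
  | none => kept ++ rest
  | some s =>
    let kept' := kept ++ PySem.List.slice rest none (some (s : Int))
    let tail := PySem.List.slice rest (some ((s : Int) + 1)) none
    match PySem.List.index? tail "</details>" with
    | none => kept'
    | some e => removePlanGo kept' (PySem.List.slice tail (some ((e : Int) + 1)) none)
termination_by rest.length
decreasing_by
  have hs : s < rest.length := by
    have := PySem.List.getElem_of_index?_eq_some h
    exact this.fst
  have h1 : PySem.List.slice rest (some ((s : Int) + 1)) none = rest.drop (s + 1) := by
    have : ((s : Int) + 1) = ((s + 1 : Nat) : Int) := by push_cast; ring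
    rw [this, PySem.List.slice_from_natCast]
  have h2 : ∀ (xs : List String) (e : Nat),
      (PySem.List.slice xs (some ((e : Int) + 1)) none).length ≤ xs.length := by
    intro xs e
    have : ((e : Int) + 1) = ((e + 1 : Nat) : Int) := by push_cast; ring
    rw [this, PySem.List.slice_from_natCast]
    simp
  calc (PySem.List.slice tail (some ((e : Int) + 1)) none).length
      ≤ tail.length := h2 tail e
    _ = (rest.drop (s + 1)).length := by rw [show tail = PySem.List.slice rest (some ((s : Int) + 1)) none from rfl, h1]
    _ < rest.length := by simp; omega

def remove_plan_alt (report : String) : String :=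
  PySem.Str.join "\n" (removePlanGo [] (PySem.Str.splitlines report))

-- ===== PRECONDITION & SPEC =====
def Spec_remove_plan (report : String) (out : String) : Prop := out = remove_plan_alt report
instance (report : String) (out : String) : Decidable (Spec_remove_plan report out) := by unfold Spec_remove_plan; infer_instance

-- ===== CLAIM =====
def Claim_equal_remove_plan : Prop := ∀ (report : String), Dom_remove_plan report → Spec_remove_plan report (remove_plan report)

-- ===== LEMMAS AND PROOFS =====

-- reference version of B's skip: drop lines up to and including the first "</details>"
def removePlanSkip : List String → List String
  | [] => []
  | l :: ls => if l = "</details>" then ls else removePlanSkip ls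

theorem removePlanSkip_length_le (ls : List String) : (removePlanSkip ls).length ≤ ls.length := by
  induction ls with
  | nil => simp [removePlanSkip]
  | cons l ls ih =>
    simp only [removePlanSkip]
    split
    · simp
    · simp; omega

-- reference recursion over the line list (proof-only bridge between the two ports)
def removePlanGoB : List String → List String
  | [] => []
  | l :: ls =>
    if l = "<details><summary>Show Plan</summary>" then removePlanGoB (removePlanSkip ls)
    else l :: removePlanGoB ls
termination_by ls => ls.length
decreasing_by
  · exact Nat.lt_succ_of_le (removePlanSkip_length_le ls)
  · exact Nat.lt_succ_self _

-- A-side: with the flag off, A's fold appends nothing until the closer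
theorem foldA_false (ls : List String) (acc : List String) :
    ((ls.foldl removePlanStepA (acc, false)).1 : List String)
      = ((removePlanSkip ls).foldl removePlanStepA (acc, true)).1 := by
  induction ls generalizing acc with
  | nil => simp [removePlanSkip]
  | cons l ls ih =>
    by_cases h : l = "</details>"
    · simp [List.foldl, removePlanStepA, removePlanSkip, h]
    · simp [List.foldl, removePlanStepA, removePlanSkip, h, ih]

-- A-side: with the flag on, A's fold produces acc ++ reference result
theorem foldA_true (ls : List String) (acc : List String) :
    ((ls.foldl removePlanStepA (acc, true)).1 : List String) = acc ++ removePlanGoB ls := by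
  induction hn : ls.length using Nat.strong_induction_on generalizing ls acc with
  | _ n ih =>
  cases ls with
  | nil => simp [removePlanGoB]
  | cons l ls =>
    by_cases h : l = "<details><summary>Show Plan</summary>"
    · simp only [List.foldl, removePlanStepA, h, removePlanGoB]
      norm_num
      rw [show decide (("<details><summary>Show Plan</summary>" : String) = "</details>") = false from by decide]
      rw [foldA_false]
      exact ih (removePlanSkip ls).length
        (by subst hn; exact Nat.lt_succ_of_le (removePlanSkip_length_le ls)) _ _ rfl
    · simp only [List.foldl, removePlanStepA, removePlanGoB, h]
      norm_num
      rw [ih ls.length (by subst hn; exact Nat.lt_succ_self _) _ _ rfl]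
      simp

-- B-side bridge lemmas
theorem goB_no_start (ls : List String)
    (h : "<details><summary>Show Plan</summary>" ∉ ls) : removePlanGoB ls = ls := by
  induction ls with
  | nil => simp [removePlanGoB]
  | cons l ls ih =>
    simp only [List.mem_cons, not_or] at h
    rw [removePlanGoB, if_neg (fun hl => h.1 hl.symm), ih h.2]

theorem goB_start (pre suf : List String)
    (h : "<details><summary>Show Plan</summary>" ∉ pre) :
    removePlanGoB (pre ++ "<details><summary>Show Plan</summary>" :: suf)
      = pre ++ removePlanGoB (removePlanSkip suf) := by
  induction pre with
  | nil => simp [removePlanGoB]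
  | cons p pre ih =>
    simp only [List.mem_cons, not_or] at h
    simp only [List.cons_append]
    rw [removePlanGoB, if_neg (fun hl => h.1 hl.symm), ih h.2]

theorem skip_no_end (ls : List String) (h : ("</details>" : String) ∉ ls) :
    removePlanSkip ls = [] := by
  induction ls with
  | nil => rfl
  | cons l ls ih =>
    simp only [List.mem_cons, not_or] at h
    rw [removePlanSkip, if_neg (fun hl => h.1 hl.symm), ih h.2]

theorem skip_end (pre suf : List String) (h : ("</details>" : String) ∉ pre) :
    removePlanSkip (pre ++ "</details>" :: suf) = suf := by
  induction pre with
  | nil => simp [removePlanSkip]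
  | cons p pre ih =>
    simp only [List.mem_cons, not_or] at h
    simp only [List.cons_append]
    rw [removePlanSkip, if_neg (fun hl => h.1 hl.symm), ih h.2]

-- main bridge: B's port computes kept ++ reference result
theorem go_eq_goB (rest kept : List String) :
    removePlanGo kept rest = kept ++ removePlanGoB rest := by
  induction hn : rest.length using Nat.strong_induction_on generalizing rest kept with
  | _ n ih =>
  rw [removePlanGo]
  cases h : PySem.List.index? rest "<details><summary>Show Plan</summary>" with
  | none =>
    rw [goB_no_start rest (by rw [← PySem.List.index?_eq_none_iff]; exact h)]
  | some s =>
    rw [PySem.List.index?_eq_some_iff] at h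
    obtain ⟨pre, suf, hrest, hlen, hnotin⟩ := h
    have htake : PySem.List.slice rest none (some (s : Int)) = pre := by
      rw [PySem.List.slice_to_natCast, hrest, ← hlen, List.take_left]
    have hdrop : PySem.List.slice rest (some ((s : Int) + 1)) none = suf := by
      have hc : ((s : Int) + 1) = ((s + 1 : Nat) : Int) := by push_cast; ring
      rw [hc, PySem.List.slice_from_natCast, hrest, ← hlen,
        show pre ++ "<details><summary>Show Plan</summary>" :: suf
            = (pre ++ ["<details><summary>Show Plan</summary>"]) ++ suf from by simp,
        show pre.length + 1 = (pre ++ ["<details><summary>Show Plan</summary>"]).length from by simp]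
      exact List.drop_left
    simp only [htake, hdrop]
    cases h2 : PySem.List.index? suf "</details>" with
    | none =>
      rw [hrest, goB_start pre suf hnotin,
        skip_no_end suf (by rw [← PySem.List.index?_eq_none_iff]; exact h2)]
      simp [removePlanGoB]
    | some e =>
      rw [PySem.List.index?_eq_some_iff] at h2
      obtain ⟨pre2, suf2, hsuf, hlen2, hnotin2⟩ := h2
      have hdrop2 : PySem.List.slice suf (some ((e : Int) + 1)) none = suf2 := by
        have hc : ((e : Int) + 1) = ((e + 1 : Nat) : Int) := by push_cast; ring
        rw [hc, PySem.List.slice_from_natCast, hsuf, ← hlen2,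
          show pre2 ++ "</details>" :: suf2 = (pre2 ++ ["</details>"]) ++ suf2 from by simp,
          show pre2.length + 1 = (pre2 ++ ["</details>"]).length from by simp]
        exact List.drop_left
      show removePlanGo (kept ++ pre) (PySem.List.slice suf (some ((e : Int) + 1)) none)
          = kept ++ removePlanGoB rest
      rw [hdrop2, hrest, goB_start pre suf hnotin, hsuf, skip_end pre2 suf2 hnotin2]
      rw [ih suf2.length (by subst hn; rw [hrest, hsuf]; simp; omega) suf2 _ rfl]
      simp

-- ===== VERDICT =====
theorem remove_plan_spec : Claim_equal_remove_plan := by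
  intro report _
  unfold Spec_remove_plan remove_plan remove_plan_alt
  rw [foldA_true, go_eq_goB]
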